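-- pv_equiv track=rewrite | github.com/zmc0806/EV-Charging-Stations-Tool | app_1.py | map_zoning_category
-- ===== SOURCE A (Python) =====
-- def map_zoning_category(zone_code):
--     """Map zone codes to categories"""
--     zoning_categories = {
--         'Commercial': ['CC', 'CN', 'CV', 'CP', 'CR', 'CCPD'],
--         'Office': ['CO'],
--         'Residential High': ['RH', 'RM-3', 'RM-4'],
--         'Residential Medium': ['RM-2', 'RM-1'],
--         'Residential Low': ['RS', 'RL'],
--         'Residential Mixed': ['RMX'],
--         'Industrial': ['IP', 'IL', 'IH', 'IS', 'IBT'],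
--         'Mixed Use': ['MU', 'EMX'],
--         'Agricultural': ['AG', 'AR'],
--         'Open Space': ['OS'],
--         'Planned': ['BLPD', 'MBPD', 'GQPD', 'MPD', 'CUPD', 'LJPD', 'LJSPD'],
--         'Transit': ['OTOP', 'OTRM', 'OTCC'],
--         'Other': ['UNZONED'],
--     }
--
--     if isinstance(zone_code, str):  # Check if zone_code is a string
--         for category, prefixes in zoning_categories.items():
--             if any(zone_code.startswith(prefix) for prefix in prefixes):
--                 return category
--     return 'Other'  # Return 'Other' for NaN or non-string values
-- ===== SOURCE B (Python) =====
-- # B: one flat prefix->category dict probed with the input's own prefixes (shortest first),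
-- # instead of scanning every category's prefix list with startswith.
-- _ZONING_CATEGORIES = {
--     'Commercial': ['CC', 'CN', 'CV', 'CP', 'CR', 'CCPD'],
--     'Office': ['CO'],
--     'Residential High': ['RH', 'RM-3', 'RM-4'],
--     'Residential Medium': ['RM-2', 'RM-1'],
--     'Residential Low': ['RS', 'RL'],
--     'Residential Mixed': ['RMX'],
--     'Industrial': ['IP', 'IL', 'IH', 'IS', 'IBT'],
--     'Mixed Use': ['MU', 'EMX'],
--     'Agricultural': ['AG', 'AR'],
--     'Open Space': ['OS'],
--     'Planned': ['BLPD', 'MBPD', 'GQPD', 'MPD', 'CUPD', 'LJPD', 'LJSPD'],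
--     'Transit': ['OTOP', 'OTRM', 'OTCC'],
--     'Other': ['UNZONED'],
-- }
-- _PREFIX_TO_CATEGORY = {
--     prefix: category
--     for category, prefixes in _ZONING_CATEGORIES.items()
--     for prefix in prefixes
-- }
--
-- _MAX_PREFIX_LEN = max(map(len, _PREFIX_TO_CATEGORY))
--
-- def map_zoning_category(zone_code):
--     """Map zone codes to categories"""
--     if not isinstance(zone_code, str):
--         return 'Other'  # NaN or non-string values
--     pref = ''
--     for ch in zone_code[:_MAX_PREFIX_LEN]:  # no key is longer than that
--         pref += ch
--         cat = _PREFIX_TO_CATEGORY.get(pref)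
--         if cat is not None:
--             return cat
--     return 'Other'
-- ===== Notes on version B (the rewrite author's own statement) =====
-- stated objective: idiomatic
-- what changed: Replaces the scan over every category's startswith-checked prefix list by one flat prefix-to-category dict built once and probed with growing prefixes of the input itself, returning on the first hit.
import Mathlib
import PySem

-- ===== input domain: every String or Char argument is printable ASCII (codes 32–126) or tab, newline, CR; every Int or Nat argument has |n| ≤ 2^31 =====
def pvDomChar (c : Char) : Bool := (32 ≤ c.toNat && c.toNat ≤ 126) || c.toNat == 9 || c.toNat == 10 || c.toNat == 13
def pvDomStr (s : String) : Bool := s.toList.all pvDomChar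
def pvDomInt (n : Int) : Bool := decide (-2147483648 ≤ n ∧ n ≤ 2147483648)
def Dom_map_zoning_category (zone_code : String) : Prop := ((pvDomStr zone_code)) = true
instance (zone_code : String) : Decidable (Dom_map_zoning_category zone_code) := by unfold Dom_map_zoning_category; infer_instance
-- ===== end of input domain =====

-- B replaces A's scan over every category's prefix list by one flat prefix→category dict
-- probed with growing prefixes of the input itself (idiomatic; same exact return value).

-- ===== PORT A =====
-- the zoning_categories dict of A, in its insertion order
def pvTable : List (String × List String) := [
  ("Commercial", ["CC", "CN", "CV", "CP", "CR", "CCPD"]),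
  ("Office", ["CO"]),
  ("Residential High", ["RH", "RM-3", "RM-4"]),
  ("Residential Medium", ["RM-2", "RM-1"]),
  ("Residential Low", ["RS", "RL"]),
  ("Residential Mixed", ["RMX"]),
  ("Industrial", ["IP", "IL", "IH", "IS", "IBT"]),
  ("Mixed Use", ["MU", "EMX"]),
  ("Agricultural", ["AG", "AR"]),
  ("Open Space", ["OS"]),
  ("Planned", ["BLPD", "MBPD", "GQPD", "MPD", "CUPD", "LJPD", "LJSPD"]),
  ("Transit", ["OTOP", "OTRM", "OTCC"]),
  ("Other", ["UNZONED"])]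

-- A's `for category, prefixes in zoning_categories.items(): if any(...): return category`
def pvGoA : List (String × List String) → String → String
  | [], _ => "Other"
  | (cat, ps) :: rest, z =>
      if ps.any (fun p => PySem.Str.startswith z p) then cat else pvGoA rest z

def map_zoning_category (zone_code : String) : String := pvGoA pvTable zone_code

-- ===== PORT B =====
-- B's flat _PREFIX_TO_CATEGORY dict (one entry per prefix, insertion order of the comprehension)
def pvPrefixMap : PySem.Dict String String := PySem.Dict.mk [
  ("CC", "Commercial"), ("CN", "Commercial"), ("CV", "Commercial"),
  ("CP", "Commercial"), ("CR", "Commercial"), ("CCPD", "Commercial"),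
  ("CO", "Office"),
  ("RH", "Residential High"), ("RM-3", "Residential High"), ("RM-4", "Residential High"),
  ("RM-2", "Residential Medium"), ("RM-1", "Residential Medium"),
  ("RS", "Residential Low"), ("RL", "Residential Low"),
  ("RMX", "Residential Mixed"),
  ("IP", "Industrial"), ("IL", "Industrial"), ("IH", "Industrial"),
  ("IS", "Industrial"), ("IBT", "Industrial"),
  ("MU", "Mixed Use"), ("EMX", "Mixed Use"),
  ("AG", "Agricultural"), ("AR", "Agricultural"),
  ("OS", "Open Space"),
  ("BLPD", "Planned"), ("MBPD", "Planned"), ("GQPD", "Planned"), ("MPD", "Planned"),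
  ("CUPD", "Planned"), ("LJPD", "Planned"), ("LJSPD", "Planned"),
  ("OTOP", "Transit"), ("OTRM", "Transit"), ("OTCC", "Transit"),
  ("UNZONED", "Other")]

-- B's `pref = ''; for ch in zone_code: pref += ch; cat = MAP.get(pref); if cat is not None: return cat`
def pvGoB : List Char → List Char → String
  | _, [] => "Other"
  | pref, ch :: rest =>
      let pref' := pref ++ [ch]
      match pvPrefixMap.get? (String.ofList pref') with
      | some cat => cat
      | none => pvGoB pref' rest

-- B's _MAX_PREFIX_LEN = max(map(len, _PREFIX_TO_CATEGORY))
def pvMaxLen : Nat := (pvPrefixMap.keys.map (fun k => k.toList.length)).foldr max 0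

-- zone_code[:_MAX_PREFIX_LEN] with a nonnegative cap is exactly List.take
def map_zoning_category_alt (zone_code : String) : String := pvGoB [] (zone_code.toList.take pvMaxLen)

-- ===== PRECONDITION & SPEC =====
def Spec_map_zoning_category (zone_code : String) (out : String) : Prop := out = map_zoning_category_alt zone_code
instance (zone_code : String) (out : String) : Decidable (Spec_map_zoning_category zone_code out) := by unfold Spec_map_zoning_category; infer_instance

-- ===== CLAIM (what is proved, stated in full; the proofs are below) =====
def Claim_equal_map_zoning_category : Prop := ∀ (zone_code : String), Dom_map_zoning_category zone_code → Spec_map_zoning_category zone_code (map_zoning_category zone_code)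

-- ===== LEMMAS AND PROOFS =====

-- startswith is list prefix
theorem pv_sw (z p : String) : PySem.Str.startswith z p = true ↔ p.toList <+: z.toList := by
  simp [pysem]

-- any two table keys that are prefix-comparable carry the same category (only CC/CCPD, both Commercial)
theorem pv_consistent : ∀ q ∈ pvPrefixMap.items, ∀ r ∈ pvPrefixMap.items,
    q.1.toList <+: r.1.toList → q.2 = r.2 := by decide

-- the flat dict contains exactly A's (prefix, category) pairs
theorem pv_table_sub : ∀ e ∈ pvTable, ∀ p ∈ e.2, (p, e.1) ∈ pvPrefixMap.items := by decide

theorem pv_items_sub : ∀ q ∈ pvPrefixMap.items, ∃ e ∈ pvTable, q.1 ∈ e.2 ∧ e.1 = q.2 := by decide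

theorem pv_keys_ne : ∀ q ∈ pvPrefixMap.items, q.1.toList ≠ [] := by decide

set_option maxRecDepth 4096 in
theorem pv_keys_le : ∀ q ∈ pvPrefixMap.items, q.1.toList.length ≤ pvMaxLen := by decide

theorem pv_A_none : ∀ (t : List (String × List String)) (z : String),
    (∀ e ∈ t, ∀ p ∈ e.2, ¬ (p.toList <+: z.toList)) → pvGoA t z = "Other" := by
  intro t
  induction t with
  | nil => intro z _; rfl
  | cons e rest ih =>
    intro z h
    obtain ⟨cat, ps⟩ := e
    simp only [pvGoA]
    have hneg : ¬ (ps.any (fun p => PySem.Str.startswith z p) = true) := by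
      intro hany
      obtain ⟨p, hp, hsw⟩ := List.any_eq_true.mp hany
      exact h (cat, ps) List.mem_cons_self p hp ((pv_sw z p).mp hsw)
    rw [if_neg hneg]
    exact ih z (fun e he p hp => h e (List.mem_cons_of_mem _ he) p hp)

theorem pv_A_some : ∀ (t : List (String × List String)) (z : String) (c : String),
    (∀ q ∈ pvPrefixMap.items, q.1.toList <+: z.toList → q.2 = c) →
    (∀ e ∈ t, ∀ p ∈ e.2, (p, e.1) ∈ pvPrefixMap.items) →
    (∃ e ∈ t, ∃ p ∈ e.2, p.toList <+: z.toList) →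
    pvGoA t z = c := by
  intro t
  induction t with
  | nil => intro z c _ _ hex; obtain ⟨e, he, _⟩ := hex; cases he
  | cons e rest ih =>
    intro z c hc hsub hex
    obtain ⟨cat, ps⟩ := e
    simp only [pvGoA]
    by_cases hany : ps.any (fun p => PySem.Str.startswith z p) = true
    · rw [if_pos hany]
      obtain ⟨p, hp, hsw⟩ := List.any_eq_true.mp hany
      exact hc (p, cat) (hsub (cat, ps) List.mem_cons_self p hp) ((pv_sw z p).mp hsw)
    · rw [if_neg hany]
      apply ih z c hc
      · intro e he p hp; exact hsub e (List.mem_cons_of_mem _ he) p hp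
      · obtain ⟨e, he, p, hp, hpre⟩ := hex
        rcases List.mem_cons.mp he with rfl | he'
        · exact absurd (List.any_eq_true.mpr ⟨p, hp, (pv_sw z p).mpr hpre⟩) hany
        · exact ⟨e, he', p, hp, hpre⟩

theorem pv_B_none : ∀ (rest pref z : List Char), z = pref ++ rest →
    (∀ q ∈ pvPrefixMap.items, ¬ (q.1.toList <+: z)) → pvGoB pref rest = "Other" := by
  intro rest
  induction rest with
  | nil => intro pref z _ _; rfl
  | cons ch rest ih =>
    intro pref z hz h
    simp only [pvGoB]
    cases hm : pvPrefixMap.get? (String.ofList (pref ++ [ch])) with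
    | some cat =>
      exfalso
      apply h _ (PySem.Dict.mem_items_of_get?_eq_some _ hm)
      rw [String.toList_ofList, hz]
      exact ⟨rest, by simp⟩
    | none =>
      exact ih (pref ++ [ch]) z (by simp [hz]) h

theorem pv_B_some : ∀ (rest pref z : List Char) (c : String), z = pref ++ rest →
    (∀ q ∈ pvPrefixMap.items, q.1.toList <+: z → q.2 = c) →
    (∃ q ∈ pvPrefixMap.items, q.1.toList <+: z ∧ pref.length < q.1.toList.length) →
    pvGoB pref rest = c := by
  intro rest
  induction rest with
  | nil =>
    intro pref z c hz _ hex
    obtain ⟨q, _, hpre, hlen⟩ := hex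
    have := hpre.length_le
    rw [hz, List.append_nil] at this
    omega
  | cons ch rest ih =>
    intro pref z c hz hc hex
    simp only [pvGoB]
    have hpref' : pref ++ [ch] <+: z := by rw [hz]; exact ⟨rest, by simp⟩
    cases hm : pvPrefixMap.get? (String.ofList (pref ++ [ch])) with
    | some cat =>
      show cat = c
      apply hc _ (PySem.Dict.mem_items_of_get?_eq_some _ hm)
      rw [String.toList_ofList]
      exact hpref'
    | none =>
      apply ih (pref ++ [ch]) z c (by simp [hz]) hc
      obtain ⟨q, hq, hpre, hlen⟩ := hex
      refine ⟨q, hq, hpre, ?_⟩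
      simp only [List.length_append, List.length_cons, List.length_nil]
      rcases Nat.lt_or_ge (pref.length + 1) q.1.toList.length with hlt | hge
      · omega
      · exfalso
        have heq : q.1.toList = pref ++ [ch] := by
          have hlen' : q.1.toList.length = (pref ++ [ch]).length := by
            simp only [List.length_append, List.length_cons, List.length_nil]; omega
          rcases List.prefix_or_prefix_of_prefix hpre hpref' with h | h
          · exact h.eq_of_length hlen'
          · exact (h.eq_of_length hlen'.symm).symm
        have hk : q.1 = String.ofList (pref ++ [ch]) := by
          rw [← heq, String.ofList_toList]
        apply (PySem.Dict.get?_eq_none_iff_not_mem_keys pvPrefixMap (String.ofList (pref ++ [ch]))).mp hm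
        rw [← hk]
        exact PySem.Dict.mem_keys_of_mem_items _ hq

-- ===== VERDICT (by name: the statement is the Claim_ definition above) =====
theorem map_zoning_category_spec : Claim_equal_map_zoning_category := by
  intro z _
  unfold Spec_map_zoning_category map_zoning_category map_zoning_category_alt
  have htk : ∀ (l : List Char), l <+: z.toList.take pvMaxLen → l <+: z.toList :=
    fun l h => h.trans (List.take_prefix _ _)
  by_cases hex : ∃ q ∈ pvPrefixMap.items, q.1.toList <+: z.toList
  · obtain ⟨q0, hq0, hpre0⟩ := hex
    have hc : ∀ q ∈ pvPrefixMap.items, q.1.toList <+: z.toList → q.2 = q0.2 := by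
      intro q hq hpre
      rcases List.prefix_or_prefix_of_prefix hpre hpre0 with h | h
      · exact pv_consistent q hq q0 hq0 h
      · exact (pv_consistent q0 hq0 q hq h).symm
    have hpre0' : q0.1.toList <+: z.toList.take pvMaxLen :=
      List.prefix_take_iff.mpr ⟨hpre0, pv_keys_le q0 hq0⟩
    rw [pv_A_some pvTable z q0.2 hc pv_table_sub ?ha,
        pv_B_some (z.toList.take pvMaxLen) [] (z.toList.take pvMaxLen) q0.2 (by simp)
          (fun q hq hpre => hc q hq (htk _ hpre)) ?hb]
    case ha =>
      obtain ⟨e, he, hmem, _⟩ := pv_items_sub q0 hq0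
      exact ⟨e, he, q0.1, hmem, hpre0⟩
    case hb =>
      exact ⟨q0, hq0, hpre0', List.length_pos_iff.mpr (pv_keys_ne q0 hq0)⟩
  · push Not at hex
    rw [pv_A_none pvTable z ?hn,
        pv_B_none (z.toList.take pvMaxLen) [] (z.toList.take pvMaxLen) (by simp)
          (fun q hq hpre => hex q hq (htk _ hpre))]
    case hn =>
      intro e he p hp hpre
      exact hex (p, e.1) (pv_table_sub e he p hp) hpre
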